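-- pv_equiv track=rewrite | github.com/kusotsu/for-PZ | pz-10/main.py | analyze_stores
-- ===== SOURCE A (Python) =====
-- def analyze_stores(stores: dict[str, set[str]]):
--     """
--     Принимает dict: {назв_магазина: set(товары)}.
--     Возвращает три списка магазинов по заданным условиям.
--     """
--     no_salt = [name for name, goods in stores.items() if 'соль' not in goods]
--     milk_and_cheese = [
--         name for name, goods in stores.items()
--         if 'молоко' in goods and 'сыр' in goods
--     ]
--     meat_and_milk = [
--         name for name, goods in stores.items()
--         if 'мясо' in goods and 'молоко' in goods
--     ]
--
--     return no_salt, milk_and_cheese, meat_and_milk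
-- ===== SOURCE B (Python) =====
-- def analyze_stores(stores: dict[str, set[str]]):
--     """Inverted index: build per-good owner sets, intersect them, then one
--     ordered membership filter over the store names."""
--     salt_owners, milk_owners, cheese_owners, meat_owners = set(), set(), set(), set()
--     for name, goods in stores.items():
--         if 'соль' in goods:
--             salt_owners.add(name)
--         if 'молоко' in goods:
--             milk_owners.add(name)
--         if 'сыр' in goods:
--             cheese_owners.add(name)
--         if 'мясо' in goods:
--             meat_owners.add(name)
--     mc = milk_owners & cheese_owners
--     mm = meat_owners & milk_owners
--     names = list(stores)
--     return ([n for n in names if n not in salt_owners],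
--             [n for n in names if n in mc],
--             [n for n in names if n in mm])
-- ===== Notes on version B (the rewrite author's own statement) =====
-- stated objective: alternative
-- what changed: Instead of filtering stores.items() three times by direct goods-membership tests, B inverts the data: one pass builds four owner sets (good -> stores carrying it), intersects them with set algebra to get the two combination sets, and produces the result lists by filtering the ordered name list through set membership.
import Mathlib
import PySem

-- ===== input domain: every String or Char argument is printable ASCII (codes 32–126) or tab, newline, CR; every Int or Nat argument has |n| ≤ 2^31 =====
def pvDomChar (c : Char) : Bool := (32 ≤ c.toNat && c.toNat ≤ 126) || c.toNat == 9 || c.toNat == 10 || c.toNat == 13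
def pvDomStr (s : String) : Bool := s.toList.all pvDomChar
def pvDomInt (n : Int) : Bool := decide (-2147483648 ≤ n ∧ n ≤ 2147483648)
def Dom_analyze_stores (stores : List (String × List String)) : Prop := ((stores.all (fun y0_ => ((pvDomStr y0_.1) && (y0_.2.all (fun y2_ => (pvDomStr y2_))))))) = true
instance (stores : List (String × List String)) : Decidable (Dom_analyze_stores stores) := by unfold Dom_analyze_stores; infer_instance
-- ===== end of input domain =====

-- B replaces A's three direct filters of stores.items() with an inverted index
-- (per-good owner sets, set intersections, one ordered membership filter); objective: alternative.

-- ===== PORT A =====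
def analyze_stores (stores : List (String × List String)) : List String × List String × List String :=
  ((stores.filter (fun p => !(p.2.contains "соль"))).map Prod.fst,
   (stores.filter (fun p => p.2.contains "молоко" && p.2.contains "сыр")).map Prod.fst,
   (stores.filter (fun p => p.2.contains "мясо" && p.2.contains "молоко")).map Prod.fst)

-- ===== PORT B =====
-- the loop body of Source B: conditionally add the store name to each of the four owner sets
def pvOwnStep (acc : PySem.Set String × PySem.Set String × PySem.Set String × PySem.Set String)
    (p : String × List String) :
    PySem.Set String × PySem.Set String × PySem.Set String × PySem.Set String :=
  (if p.2.contains "соль" then PySem.Set.add acc.1 p.1 else acc.1,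
   if p.2.contains "молоко" then PySem.Set.add acc.2.1 p.1 else acc.2.1,
   if p.2.contains "сыр" then PySem.Set.add acc.2.2.1 p.1 else acc.2.2.1,
   if p.2.contains "мясо" then PySem.Set.add acc.2.2.2 p.1 else acc.2.2.2)

def analyze_stores_alt (stores : List (String × List String)) : List String × List String × List String :=
  let owners := stores.foldl pvOwnStep (PySem.Set.empty, PySem.Set.empty, PySem.Set.empty, PySem.Set.empty)
  let mc := PySem.Set.inter owners.2.1 owners.2.2.1
  let mm := PySem.Set.inter owners.2.2.2 owners.2.1
  let names := stores.map Prod.fst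
  (names.filter (fun n => !(PySem.Set.contains owners.1 n)),
   names.filter (fun n => PySem.Set.contains mc n),
   names.filter (fun n => PySem.Set.contains mm n))

-- ===== PRECONDITION & SPEC =====
-- Pre_ states that the store names (dict keys) are pairwise distinct — guaranteed for every
-- Python dict, so it excludes no input the Python A accepts; B's name-set index needs it.
def Pre_analyze_stores (stores : List (String × List String)) : Prop :=
  (stores.map Prod.fst).Nodup
instance (stores : List (String × List String)) : Decidable (Pre_analyze_stores stores) := by unfold Pre_analyze_stores; infer_instance

def pvWitness_analyze_stores : (List (String × List String)) :=
  [("a", ["x"]), ("b", ["y", "z"])]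

def Spec_analyze_stores (stores : List (String × List String)) (out : List String × List String × List String) : Prop := out = analyze_stores_alt stores
instance (stores : List (String × List String)) (out : List String × List String × List String) : Decidable (Spec_analyze_stores stores out) := by unfold Spec_analyze_stores; infer_instance

-- ===== CLAIM (what is proved, stated in full; the proofs are below) =====
def Claim_equal_analyze_stores : Prop := ∀ (stores : List (String × List String)), Dom_analyze_stores stores → Pre_analyze_stores stores → Spec_analyze_stores stores (analyze_stores stores)

-- ===== LEMMAS AND PROOFS =====

-- membership in each component of the owner-set fold
lemma mem_fold1 (stores : List (String × List String))
    (acc : PySem.Set String × PySem.Set String × PySem.Set String × PySem.Set String) (n : String) :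
    n ∈ (stores.foldl pvOwnStep acc).1 ↔ n ∈ acc.1 ∨ ∃ p ∈ stores, p.1 = n ∧ "соль" ∈ p.2 := by
  induction stores generalizing acc with
  | nil => simp
  | cons h t ih =>
    simp only [List.foldl_cons, ih, pvOwnStep]
    by_cases hc : "соль" ∈ h.2
    · simp [hc, PySem.Set.mem_add, eq_comm]
      constructor
      · rintro ((ha | rfl) | ⟨b, hb, hx⟩)
        · exact Or.inl ha
        · exact Or.inr ⟨h.2, Or.inl Prod.mk.eta.symm, hc⟩
        · exact Or.inr ⟨b, Or.inr hb, hx⟩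
      · rintro (ha | ⟨b, (heq | hb), hx⟩)
        · exact Or.inl (Or.inl ha)
        · exact Or.inl (Or.inr (by simp [heq]))
        · exact Or.inr ⟨b, hb, hx⟩
    · simp [hc, eq_comm]
      constructor
      · rintro (ha | ⟨b, hb, hx⟩)
        · exact Or.inl ha
        · exact Or.inr ⟨b, Or.inr hb, hx⟩
      · rintro (ha | ⟨b, (heq | hb), hx⟩)
        · exact Or.inl ha
        · exact absurd (show "соль" ∈ h.2 by rw [heq]; exact hx) hc
        · exact Or.inr ⟨b, hb, hx⟩

lemma mem_fold2 (stores : List (String × List String))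
    (acc : PySem.Set String × PySem.Set String × PySem.Set String × PySem.Set String) (n : String) :
    n ∈ (stores.foldl pvOwnStep acc).2.1 ↔ n ∈ acc.2.1 ∨ ∃ p ∈ stores, p.1 = n ∧ "молоко" ∈ p.2 := by
  induction stores generalizing acc with
  | nil => simp
  | cons h t ih =>
    simp only [List.foldl_cons, ih, pvOwnStep]
    by_cases hc : "молоко" ∈ h.2
    · simp [hc, PySem.Set.mem_add, eq_comm]
      constructor
      · rintro ((ha | rfl) | ⟨b, hb, hx⟩)
        · exact Or.inl ha
        · exact Or.inr ⟨h.2, Or.inl Prod.mk.eta.symm, hc⟩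
        · exact Or.inr ⟨b, Or.inr hb, hx⟩
      · rintro (ha | ⟨b, (heq | hb), hx⟩)
        · exact Or.inl (Or.inl ha)
        · exact Or.inl (Or.inr (by simp [heq]))
        · exact Or.inr ⟨b, hb, hx⟩
    · simp [hc, eq_comm]
      constructor
      · rintro (ha | ⟨b, hb, hx⟩)
        · exact Or.inl ha
        · exact Or.inr ⟨b, Or.inr hb, hx⟩
      · rintro (ha | ⟨b, (heq | hb), hx⟩)
        · exact Or.inl ha
        · exact absurd (show "молоко" ∈ h.2 by rw [heq]; exact hx) hc
        · exact Or.inr ⟨b, hb, hx⟩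

lemma mem_fold3 (stores : List (String × List String))
    (acc : PySem.Set String × PySem.Set String × PySem.Set String × PySem.Set String) (n : String) :
    n ∈ (stores.foldl pvOwnStep acc).2.2.1 ↔ n ∈ acc.2.2.1 ∨ ∃ p ∈ stores, p.1 = n ∧ "сыр" ∈ p.2 := by
  induction stores generalizing acc with
  | nil => simp
  | cons h t ih =>
    simp only [List.foldl_cons, ih, pvOwnStep]
    by_cases hc : "сыр" ∈ h.2
    · simp [hc, PySem.Set.mem_add, eq_comm]
      constructor
      · rintro ((ha | rfl) | ⟨b, hb, hx⟩)
        · exact Or.inl ha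
        · exact Or.inr ⟨h.2, Or.inl Prod.mk.eta.symm, hc⟩
        · exact Or.inr ⟨b, Or.inr hb, hx⟩
      · rintro (ha | ⟨b, (heq | hb), hx⟩)
        · exact Or.inl (Or.inl ha)
        · exact Or.inl (Or.inr (by simp [heq]))
        · exact Or.inr ⟨b, hb, hx⟩
    · simp [hc, eq_comm]
      constructor
      · rintro (ha | ⟨b, hb, hx⟩)
        · exact Or.inl ha
        · exact Or.inr ⟨b, Or.inr hb, hx⟩
      · rintro (ha | ⟨b, (heq | hb), hx⟩)
        · exact Or.inl ha
        · exact absurd (show "сыр" ∈ h.2 by rw [heq]; exact hx) hc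
        · exact Or.inr ⟨b, hb, hx⟩

lemma mem_fold4 (stores : List (String × List String))
    (acc : PySem.Set String × PySem.Set String × PySem.Set String × PySem.Set String) (n : String) :
    n ∈ (stores.foldl pvOwnStep acc).2.2.2 ↔ n ∈ acc.2.2.2 ∨ ∃ p ∈ stores, p.1 = n ∧ "мясо" ∈ p.2 := by
  induction stores generalizing acc with
  | nil => simp
  | cons h t ih =>
    simp only [List.foldl_cons, ih, pvOwnStep]
    by_cases hc : "мясо" ∈ h.2
    · simp [hc, PySem.Set.mem_add, eq_comm]
      constructor
      · rintro ((ha | rfl) | ⟨b, hb, hx⟩)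
        · exact Or.inl ha
        · exact Or.inr ⟨h.2, Or.inl Prod.mk.eta.symm, hc⟩
        · exact Or.inr ⟨b, Or.inr hb, hx⟩
      · rintro (ha | ⟨b, (heq | hb), hx⟩)
        · exact Or.inl (Or.inl ha)
        · exact Or.inl (Or.inr (by simp [heq]))
        · exact Or.inr ⟨b, hb, hx⟩
    · simp [hc, eq_comm]
      constructor
      · rintro (ha | ⟨b, hb, hx⟩)
        · exact Or.inl ha
        · exact Or.inr ⟨b, Or.inr hb, hx⟩
      · rintro (ha | ⟨b, (heq | hb), hx⟩)
        · exact Or.inl ha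
        · exact absurd (show "мясо" ∈ h.2 by rw [heq]; exact hx) hc
        · exact Or.inr ⟨b, hb, hx⟩

-- with distinct keys, a pair of the list is determined by its key
lemma key_unique {stores : List (String × List String)}
    (hnd : (stores.map Prod.fst).Nodup) {p q : String × List String}
    (hp : p ∈ stores) (hq : q ∈ stores) (h : p.1 = q.1) : p = q := by
  induction stores with
  | nil => cases hp
  | cons a t ih =>
    rw [List.map_cons, List.nodup_cons] at hnd
    rcases List.mem_cons.1 hp with rfl | hp' <;> rcases List.mem_cons.1 hq with rfl | hq'
    · rfl
    · exfalso
      have hm : q.1 ∈ t.map Prod.fst := List.mem_map_of_mem hq'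
      rw [← h] at hm; exact hnd.1 hm
    · exfalso
      have hm : p.1 ∈ t.map Prod.fst := List.mem_map_of_mem hp'
      rw [h] at hm; exact hnd.1 hm
    · exact ih hnd.2 hp' hq'

-- filtering the name list by a test that agrees pointwise with a pair predicate
lemma filter_map_fst (stores : List (String × List String))
    (P : String × List String → Bool) (q : String → Bool)
    (h : ∀ p ∈ stores, q p.1 = P p) :
    (stores.map Prod.fst).filter q = (stores.filter P).map Prod.fst := by
  induction stores with
  | nil => rfl
  | cons a t ih =>
    have ha := h a (List.mem_cons_self ..)
    simp only [List.map_cons, List.filter_cons, ha,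
      ih (fun p hp => h p (List.mem_cons_of_mem _ hp))]
    by_cases hP : P a = true <;> simp [hP]

-- ===== VERDICT (by name: the statement is the Claim_ definition above) =====
theorem analyze_stores_spec : Claim_equal_analyze_stores := by
  intro stores _ hpre
  have hku : ∀ {p q : String × List String}, p ∈ stores → q ∈ stores → p.1 = q.1 → p = q :=
    fun hp hq h => key_unique hpre hp hq h
  unfold Spec_analyze_stores analyze_stores analyze_stores_alt
  simp only []
  refine Prod.ext ?_ (Prod.ext ?_ ?_)
  · refine ((filter_map_fst stores (fun p => !(p.2.contains "соль")) _ fun p hp => ?_).symm)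
    have hb : PySem.Set.contains
        (stores.foldl pvOwnStep (PySem.Set.empty, PySem.Set.empty, PySem.Set.empty, PySem.Set.empty)).1 p.1
        = p.2.contains "соль" := by
      rw [Bool.eq_iff_iff, PySem.Set.contains_iff, mem_fold1, List.contains_iff_mem]
      simp only [PySem.Set.empty, List.not_mem_nil, false_or]
      constructor
      · rintro ⟨r, hr, hrk, hrs⟩; rwa [hku hr hp hrk] at hrs
      · exact fun hs => ⟨p, hp, rfl, hs⟩
    simp only [hb]
  · refine ((filter_map_fst stores (fun p => p.2.contains "молоко" && p.2.contains "сыр") _ fun p hp => ?_).symm)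
    have hb : PySem.Set.contains
        (PySem.Set.inter
          (stores.foldl pvOwnStep (PySem.Set.empty, PySem.Set.empty, PySem.Set.empty, PySem.Set.empty)).2.1
          (stores.foldl pvOwnStep (PySem.Set.empty, PySem.Set.empty, PySem.Set.empty, PySem.Set.empty)).2.2.1) p.1
        = (p.2.contains "молоко" && p.2.contains "сыр") := by
      rw [Bool.eq_iff_iff, PySem.Set.contains_iff, PySem.Set.mem_inter, mem_fold2, mem_fold3,
        Bool.and_eq_true, List.contains_iff_mem, List.contains_iff_mem]
      simp only [PySem.Set.empty, List.not_mem_nil, false_or]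
      constructor
      · rintro ⟨⟨r, hr, hrk, hrs⟩, ⟨u, hu, huk, hus⟩⟩
        rw [hku hr hp hrk] at hrs; rw [hku hu hp huk] at hus
        exact ⟨hrs, hus⟩
      · exact fun ⟨h1, h2⟩ => ⟨⟨p, hp, rfl, h1⟩, ⟨p, hp, rfl, h2⟩⟩
    simp only [hb]
  · refine ((filter_map_fst stores (fun p => p.2.contains "мясо" && p.2.contains "молоко") _ fun p hp => ?_).symm)
    have hb : PySem.Set.contains
        (PySem.Set.inter
          (stores.foldl pvOwnStep (PySem.Set.empty, PySem.Set.empty, PySem.Set.empty, PySem.Set.empty)).2.2.2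
          (stores.foldl pvOwnStep (PySem.Set.empty, PySem.Set.empty, PySem.Set.empty, PySem.Set.empty)).2.1) p.1
        = (p.2.contains "мясо" && p.2.contains "молоко") := by
      rw [Bool.eq_iff_iff, PySem.Set.contains_iff, PySem.Set.mem_inter, mem_fold4, mem_fold2,
        Bool.and_eq_true, List.contains_iff_mem, List.contains_iff_mem]
      simp only [PySem.Set.empty, List.not_mem_nil, false_or]
      constructor
      · rintro ⟨⟨r, hr, hrk, hrs⟩, ⟨u, hu, huk, hus⟩⟩
        rw [hku hr hp hrk] at hrs; rw [hku hu hp huk] at hus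
        exact ⟨hrs, hus⟩
      · exact fun ⟨h1, h2⟩ => ⟨⟨p, hp, rfl, h1⟩, ⟨p, hp, rfl, h2⟩⟩
    simp only [hb]
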